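-- pv_equiv track=rewrite | github.com/ArmaghanSarvar/Bioinformatics | Star.py | get_gapped
-- ===== SOURCE A (Python) =====
-- def get_gapped(res):
--     min_gap = len(res) - 1
--     min_gap_idx = len(res[0]) - 1
--     i = 0
--     while i < len(res):
--         for j in range(len(res[0])):
--             if res[i][j] == '-' or res[i + 1][j] == '-':
--                 if j <= min_gap_idx:
--                     min_gap_idx = j
--                     min_gap = i
--         i += 2
--     res.remove(res[min_gap])
--     res.remove(res[min_gap])
--     return res
-- ===== SOURCE B (Python) =====
-- def get_gapped(res):
--     # Column-major scan with early termination: stop at the first column that has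
--     # a gap in some row-pair; among the pairs gapped there, the last one wins
--     # (same winner as A's pair-major full scan with its <= update).
--     # Mutates res in place via remove(), exactly as A does.
--     n, m = len(res), len(res[0])
--     min_gap = n - 1
--     for j in range(m):
--         hit = None
--         for i in range(0, n, 2):
--             if res[i][j] == '-' or res[i + 1][j] == '-':
--                 hit = i
--         if hit is not None:
--             min_gap = hit
--             break
--     res.remove(res[min_gap])
--     res.remove(res[min_gap])
--     return res
-- ===== Notes on version B (the rewrite author's own statement) =====
-- stated objective: alternative
-- what changed: B inverts the loop nesting: it scans column-by-column and stops at the first column containing a gap, taking the last gapped pair there, instead of A's pair-major full scan that maintains a running (min_gap, min_gap_idx) over all pairs and columns.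
import Mathlib
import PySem

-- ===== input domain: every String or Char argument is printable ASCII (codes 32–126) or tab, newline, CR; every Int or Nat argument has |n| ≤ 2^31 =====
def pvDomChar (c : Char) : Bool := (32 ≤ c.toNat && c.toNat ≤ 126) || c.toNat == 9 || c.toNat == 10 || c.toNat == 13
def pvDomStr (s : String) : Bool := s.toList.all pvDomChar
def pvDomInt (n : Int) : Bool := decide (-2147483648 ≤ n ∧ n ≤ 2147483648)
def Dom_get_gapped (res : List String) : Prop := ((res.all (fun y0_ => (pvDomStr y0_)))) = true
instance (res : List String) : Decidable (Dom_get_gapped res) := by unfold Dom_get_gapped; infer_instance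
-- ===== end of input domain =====

-- B inverts A's loop nesting: it scans column-by-column and stops at the first gapped
-- column (taking the last gapped pair there), instead of A's pair-major full scan.
-- Both Pythons mutate res in place via remove(); the theorems are about the return value.

-- res[i][j] == '-'  (false where Python would raise; Pre_ keeps all accesses in range)
def pvDash (res : List String) (i j : Int) : Bool :=
  ((PySem.List.pyGet? res i).bind fun s => PySem.Str.pyGet? s j) == some '-'

-- the shared tail of both Pythons: res.remove(res[k]); res.remove(res[k])
def pvRemovePair (res : List String) (k : Int) : List String :=
  let r1 := (PySem.List.remove? res ((PySem.List.pyGet? res k).getD "")).getD res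
  (PySem.List.remove? r1 ((PySem.List.pyGet? r1 k).getD "")).getD r1

-- ===== PORT A =====
def get_gapped (res : List String) : List String :=
  let n : Int := res.length
  let m : Int := PySem.Str.len ((PySem.List.pyGet? res 0).getD "")
  let st := (PySem.List.pyRange 0 n 2).foldl (fun (st : Int × Int) i =>
      (PySem.List.pyRange 0 m 1).foldl (fun (st : Int × Int) j =>
        if pvDash res i j || pvDash res (i + 1) j then
          (if j ≤ st.2 then (i, j) else st)
        else st) st)
    (n - 1, m - 1)
  pvRemovePair res st.1

-- ===== PORT B =====
-- inner loop of B: hit = None; for i in range(0, n, 2): if gap at column j: hit = i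
def pvColHit (res : List String) (n j : Int) : Option Int :=
  (PySem.List.pyRange 0 n 2).foldl (fun h i =>
    if pvDash res i j || pvDash res (i + 1) j then some i else h) none

-- outer loop of B: for j over the columns, break at the first hit
def pvGoCols (res : List String) (n : Int) : List Int → Int
  | [] => n - 1
  | j :: rest =>
    match pvColHit res n j with
    | some i => i
    | none => pvGoCols res n rest

def get_gapped_alt (res : List String) : List String :=
  let n : Int := res.length
  let m : Int := PySem.Str.len ((PySem.List.pyGet? res 0).getD "")
  pvRemovePair res (pvGoCols res n (PySem.List.pyRange 0 m 1))

-- ===== PRECONDITION & SPEC =====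
-- row k of res as a character list ("" past the end; Pre_ keeps the used accesses in range)
def pvRowC (res : List String) (k : Nat) : List Char := (res.getD k "").toList

-- Pre_ = exactly where the Python A returns: nonempty, evenly many rows, every access
-- res[i][j] that A's short-circuit `or` actually evaluates is in range (the second row of
-- a pair is only read at column j when the first row's char there is not '-'), and some
-- pair has a gap within the first len(res[0]) columns (else the second remove raises).
def Pre_get_gapped (res : List String) : Prop :=
  res ≠ [] ∧ res.length % 2 = 0 ∧
  (∀ k < res.length / 2, ∀ j < res.headI.toList.length,
      j < (pvRowC res (2 * k)).length ∧
      ((pvRowC res (2 * k)).getD j ' ' = '-' ∨ j < (pvRowC res (2 * k + 1)).length)) ∧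
  (∃ k < res.length / 2, ∃ j < res.headI.toList.length,
      (pvRowC res (2 * k)).getD j ' ' = '-' ∨ (pvRowC res (2 * k + 1)).getD j ' ' = '-')
instance (res : List String) : Decidable (Pre_get_gapped res) := by unfold Pre_get_gapped; infer_instance

def pvWitness_get_gapped : List String := ["a-", "bb"]

def Spec_get_gapped (res : List String) (out : List String) : Prop := out = get_gapped_alt res
instance (res : List String) (out : List String) : Decidable (Spec_get_gapped res out) := by unfold Spec_get_gapped; infer_instance

-- ===== CLAIM (what is proved, stated in full; the proofs are below) =====
def Claim_equal_get_gapped : Prop := ∀ (res : List String), Dom_get_gapped res → Pre_get_gapped res → Spec_get_gapped res (get_gapped res)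

-- ===== LEMMAS AND PROOFS =====

-- first-hit column of A's per-pair scan (= Python's first gapped column of pair i)
def pvMinCol (g : Int → Int → Bool) (C : List Int) (i : Int) : Option Int := C.find? (g i)

-- last pair whose first gapped column is j
def pvLastM (g : Int → Int → Bool) (C : List Int) (j : Int) (P : List Int) (d : Int) : Int :=
  P.foldl (fun a i => if pvMinCol g C i == some j then i else a) d

-- first column ≤ mi that is some pair's first gapped column
def pvFindC (g : Int → Int → Bool) (C : List Int) (mi : Int) (P : List Int) : Option Int :=
  C.find? (fun j => decide (j ≤ mi) && P.any (fun i => pvMinCol g C i == some j))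

theorem pvFindCongr {α : Type} (l : List α) (p q : α → Bool) (h : ∀ x ∈ l, p x = q x) :
    l.find? p = l.find? q := by
  induction l with
  | nil => rfl
  | cons x xs ih =>
    have hx := h x (by simp)
    by_cases hp : p x = true
    · rw [List.find?_cons_of_pos hp, List.find?_cons_of_pos (hx ▸ hp)]
    · rw [List.find?_cons_of_neg (by simpa using hp),
        List.find?_cons_of_neg (by simp [← hx]; simpa using hp)]
      exact ih (fun y hy => h y (by simp [hy]))

-- on a strictly ascending list, find? = some j means the predicate fails below j
theorem pvFindMin (l : List Int) (hl : l.Pairwise (· < ·)) (p : Int → Bool) (j : Int)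
    (h : l.find? p = some j) : ∀ j' ∈ l, j' < j → p j' = false := by
  induction l with
  | nil => simp
  | cons x xs ih =>
    intro j' hj' hlt
    rcases List.pairwise_cons.mp hl with ⟨hx, hxs⟩
    by_cases hp : p x = true
    · rw [List.find?_cons_of_pos hp] at h
      injection h with h; subst h
      rcases hj' with _ | hj'
      · omega
      · exact absurd (hx _ (by assumption)) (by omega)
    · rw [List.find?_cons_of_neg (by simpa using hp)] at h
      rcases hj' with _ | hj'
      · simpa using hp
      · exact ih hxs h j' (by assumption) hlt

-- converse: a member where p holds, below which p fails, is what find? returns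
theorem pvFindSome (l : List Int) (hl : l.Pairwise (· < ·)) (p : Int → Bool) (j : Int)
    (hj : j ∈ l) (hpj : p j = true) (hmin : ∀ j' ∈ l, j' < j → p j' = false) :
    l.find? p = some j := by
  induction l with
  | nil => simp at hj
  | cons x xs ih =>
    rcases List.pairwise_cons.mp hl with ⟨hx, hxs⟩
    rcases List.mem_cons.mp hj with rfl | hj'
    · rw [List.find?_cons_of_pos hpj]
    · have hlt : x < j := hx _ hj'
      rw [List.find?_cons_of_neg (by simp [hmin x (by simp) hlt])]
      exact ih hxs hj' (fun j'' h1 h2 => hmin j'' (by simp [h1]) h2)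

theorem pvLastM_const (g : Int → Int → Bool) (C : List Int) (j : Int) (P : List Int) (d : Int)
    (h : ∀ i ∈ P, (pvMinCol g C i == some j) = false) : pvLastM g C j P d = d := by
  induction P generalizing d with
  | nil => rfl
  | cons i P' ih =>
    simp only [pvLastM, List.foldl_cons, h i (by simp)]
    exact ih d (fun i' hi' => h i' (by simp [hi']))

theorem pvLastM_irrel (g : Int → Int → Bool) (C : List Int) (j : Int) (P : List Int) (d1 d2 : Int)
    (h : P.any (fun i => pvMinCol g C i == some j) = true) :
    pvLastM g C j P d1 = pvLastM g C j P d2 := by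
  induction P generalizing d1 d2 with
  | nil => simp at h
  | cons i P' ih =>
    by_cases hi : (pvMinCol g C i == some j) = true
    · simp only [pvLastM, List.foldl_cons, hi, if_true]
    · simp only [List.any_cons, hi, Bool.false_or] at h
      simp only [pvLastM, List.foldl_cons, hi]
      exact ih d1 d2 h

theorem pvFoldOptGetD (c : Int → Bool) (P : List Int) :
    ∀ (h : Option Int) (d : Int),
    (P.foldl (fun h i => if c i then some i else h) h).getD d
    = P.foldl (fun a i => if c i then i else a) (h.getD d) := by
  induction P with
  | nil => intro h d; rfl
  | cons i P' ih =>
    intro h d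
    by_cases hc : c i = true
    · simp only [List.foldl_cons, hc, if_true, ih]
      rfl
    · simp only [List.foldl_cons, hc, ih]
      simp

theorem pvFoldOptIsSome (c : Int → Bool) (P : List Int) :
    ∀ (h : Option Int),
    (P.foldl (fun h i => if c i then some i else h) h).isSome = (h.isSome || P.any c) := by
  induction P with
  | nil => intro h; simp
  | cons i P' ih =>
    intro h
    by_cases hc : c i = true
    · simp [List.foldl_cons, hc, ih]
    · simp [List.foldl_cons, hc, ih]

-- A's inner column scan of one pair i, characterized by the pair's first gapped column
theorem pvInner (g : Int → Bool) (i : Int) (C : List Int) (hC : C.Pairwise (· < ·)) :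
    ∀ (st : Int × Int),
    C.foldl (fun st j => if g j then (if j ≤ st.2 then (i, j) else st) else st) st
    = match C.find? g with
      | none => st
      | some j => if j ≤ st.2 then (i, j) else st := by
  induction C with
  | nil => intro st; rfl
  | cons c C' ih =>
    intro st
    rcases List.pairwise_cons.mp hC with ⟨hc, hC'⟩
    by_cases hg : g c = true
    · rw [List.foldl_cons, List.find?_cons_of_pos hg]
      simp only [hg, if_true]
      by_cases hle : c ≤ st.2
      · rw [if_pos hle, ih hC' (i, c)]
        cases hf : C'.find? g with
        | none => rfl
        | some j' =>
          have : c < j' := hc _ (List.mem_of_find?_eq_some hf)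
          simp only []
          rw [if_neg (by omega : ¬ j' ≤ c)]
      · rw [if_neg hle, ih hC' st]
        cases hf : C'.find? g with
        | none => rfl
        | some j' =>
          have : c < j' := hc _ (List.mem_of_find?_eq_some hf)
          simp only []
          rw [if_neg (by omega : ¬ j' ≤ st.2)]
    · rw [List.foldl_cons, List.find?_cons_of_neg (by simpa using hg)]
      simp only [hg]
      exact ih hC' st

-- A's outer pair scan: winner = last pair attaining the minimal first-gap column ≤ mi
theorem pvOuter (g : Int → Int → Bool) (C : List Int) (hC : C.Pairwise (· < ·)) :
    ∀ (P : List Int) (d mi : Int),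
    P.foldl (fun st i => match pvMinCol g C i with
      | none => st
      | some j => if j ≤ st.2 then (i, j) else st) (d, mi)
    = match pvFindC g C mi P with
      | none => (d, mi)
      | some j => (pvLastM g C j P d, j) := by
  intro P
  induction P with
  | nil =>
    intro d mi
    have : pvFindC g C mi ([] : List Int) = none := by
      apply List.find?_eq_none.mpr; intro x hx; simp
    rw [this]; rfl
  | cons i P' ih =>
    intro d mi
    rw [List.foldl_cons]
    cases hmc : pvMinCol g C i with
    | none =>
      simp only []
      rw [ih d mi]
      have hcongr : pvFindC g C mi (i :: P') = pvFindC g C mi P' := by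
        apply pvFindCongr
        intro j hj
        simp [hmc, List.any_cons]
      rw [hcongr]
      cases hf : pvFindC g C mi P' with
      | none => rfl
      | some j =>
        simp only []
        have : pvLastM g C j (i :: P') d = pvLastM g C j P' d := by
          simp [pvLastM, List.foldl_cons, hmc]
        rw [this]
    | some j0 =>
      have hj0C : j0 ∈ C := List.mem_of_find?_eq_some hmc
      have hgij0 : g i j0 = true := List.find?_some hmc
      by_cases hle : j0 ≤ mi
      · simp only []
        rw [if_pos hle, ih i j0]
        cases hf : pvFindC g C j0 P' with
        | none =>
          have hnone := List.find?_eq_none.mp hf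
          have hfind : pvFindC g C mi (i :: P') = some j0 := by
            apply pvFindSome C hC _ j0 hj0C
            · simp [hle, hmc]
            · intro j' hj' hlt
              have h1 : (pvMinCol g C i == some j') = false := by
                simp [hmc]; omega
              have h2 : P'.any (fun i' => pvMinCol g C i' == some j') = false := by
                by_contra hany
                have := hnone j' hj'
                simp only [Bool.not_eq_true, Bool.and_eq_false_iff] at this
                rcases this with h | h
                · simp at h; omega
                · exact absurd h (by simpa using hany)
              simp [List.any_cons, h1, h2]
          rw [hfind]
          simp only []
          have hl1 : pvLastM g C j0 (i :: P') d = pvLastM g C j0 P' i := by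
            simp [pvLastM, List.foldl_cons, hmc]
          rw [hl1]
          have : pvLastM g C j0 P' i = i := by
            apply pvLastM_const
            intro i' hi'
            have := hnone j0 hj0C
            simp only [Bool.not_eq_true, Bool.and_eq_false_iff] at this
            rcases this with h | h
            · simp at h
            · simpa using (List.any_eq_false.mp h) i' hi'
          rw [this]
        | some j1 =>
          have hj1C : j1 ∈ C := List.mem_of_find?_eq_some hf
          have hp1 := List.find?_some hf
          simp only [Bool.and_eq_true, decide_eq_true_eq] at hp1
          obtain ⟨hj1le, hany1⟩ := hp1
          have hminP' := pvFindMin C hC _ j1 hf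
          have hfind : pvFindC g C mi (i :: P') = some j1 := by
            apply pvFindSome C hC _ j1 hj1C
            · simp only [Bool.and_eq_true, decide_eq_true_eq]
              refine ⟨by omega, ?_⟩
              simp [List.any_cons, hany1]
            · intro j' hj' hlt
              have h2 := hminP' j' hj' hlt
              simp only [Bool.and_eq_false_iff] at h2
              have h1 : (pvMinCol g C i == some j') = false := by
                simp [hmc]; omega
              rcases h2 with h | h
              · simp only [decide_eq_false_iff_not] at h
                omega
              · simp [List.any_cons, h1, h]
          rw [hfind]
          simp only []
          by_cases hj10 : j1 = j0
          · subst hj10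
            have : pvLastM g C j1 (i :: P') d = pvLastM g C j1 P' i := by
              simp [pvLastM, List.foldl_cons, hmc]
            rw [this]
          · have : pvLastM g C j1 (i :: P') d = pvLastM g C j1 P' d := by
              simp only [pvLastM, List.foldl_cons, hmc]
              rw [if_neg (by simp; omega)]
            rw [this, pvLastM_irrel g C j1 P' d i hany1]
      · simp only []
        rw [if_neg hle, ih d mi]
        have hcongr : pvFindC g C mi (i :: P') = pvFindC g C mi P' := by
          apply pvFindCongr
          intro j hj
          by_cases hjmi : j ≤ mi
          · have : (pvMinCol g C i == some j) = false := by simp [hmc]; omega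
            simp [List.any_cons, this]
          · simp [hjmi]
        rw [hcongr]
        cases hf : pvFindC g C mi P' with
        | none => rfl
        | some j =>
          have hjle := List.find?_some hf
          simp only [Bool.and_eq_true, decide_eq_true_eq] at hjle
          simp only []
          have : pvLastM g C j (i :: P') d = pvLastM g C j P' d := by
            simp only [pvLastM, List.foldl_cons, hmc]
            rw [if_neg (by simp; omega)]
          rw [this]

-- B's for-with-break over the columns, characterized by find?
theorem pvGoColsChar (res : List String) (n : Int) : ∀ (C : List Int),
    pvGoCols res n C = match C.find? (fun j => (pvColHit res n j).isSome) with
      | none => n - 1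
      | some j => (pvColHit res n j).getD (n - 1) := by
  intro C
  induction C with
  | nil => rfl
  | cons j rest ih =>
    cases h : pvColHit res n j with
    | some i =>
      rw [List.find?_cons_of_pos (by simp [h])]
      simp [pvGoCols, h]
    | none =>
      rw [List.find?_cons_of_neg (by simp [h])]
      simpa [pvGoCols, h] using ih

-- the two characterizations agree: the first column holding some pair's FIRST gap is the
-- first column holding ANY gap, and the winning pairs there coincide
theorem pvBridge (res : List String) (n m : Int) :
    (match pvFindC (fun i j => pvDash res i j || pvDash res (i + 1) j) (PySem.List.pyRange 0 m 1) (m - 1) (PySem.List.pyRange 0 n 2) with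
      | none => ((n - 1 : Int), (m - 1 : Int))
      | some j => (pvLastM (fun i j => pvDash res i j || pvDash res (i + 1) j) (PySem.List.pyRange 0 m 1) j (PySem.List.pyRange 0 n 2) (n - 1), j)).1
    = pvGoCols res n (PySem.List.pyRange 0 m 1) := by
  set g := fun i j => pvDash res i j || pvDash res (i + 1) j with hg
  set C := PySem.List.pyRange 0 m 1 with hCdef
  set P := PySem.List.pyRange 0 n 2 with hPdef
  have hC : C.Pairwise (· < ·) := PySem.List.pairwise_lt_pyRange_one 0 m
  have hUB : ∀ j ∈ C, j ≤ m - 1 := by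
    intro j hj
    rw [hCdef, PySem.List.mem_pyRange_one] at hj
    omega
  have hisSome : ∀ j, (pvColHit res n j).isSome = P.any (fun i => g i j) := by
    intro j
    simpa using pvFoldOptIsSome (fun i => g i j) P none
  rw [pvGoColsChar]
  cases h1 : pvFindC g C (m - 1) P with
  | none =>
    have hnone := List.find?_eq_none.mp h1
    have : C.find? (fun j => (pvColHit res n j).isSome) = none := by
      apply List.find?_eq_none.mpr
      intro j hj
      rw [hisSome]
      intro hany
      obtain ⟨i, hiP, hgij⟩ := List.any_eq_true.mp hany
      have hsome : (C.find? (g i)).isSome := List.find?_isSome.mpr ⟨j, hj, hgij⟩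
      obtain ⟨j', hj'⟩ := Option.isSome_iff_exists.mp hsome
      have hj'C : j' ∈ C := List.mem_of_find?_eq_some hj'
      have hn := hnone j' hj'C
      simp only [Bool.not_eq_true, Bool.and_eq_false_iff, decide_eq_false_iff_not] at hn
      rcases hn with h | h
      · exact h (hUB j' hj'C)
      · exact absurd (by simp [pvMinCol, hj'] : (pvMinCol g C i == some j') = true)
          (by simpa using List.any_eq_false.mp h i hiP)
    rw [this]
  | some jst =>
    have hjstC : jst ∈ C := List.mem_of_find?_eq_some h1
    have hp1 := List.find?_some h1
    simp only [Bool.and_eq_true, decide_eq_true_eq] at hp1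
    obtain ⟨hjle, hanyM⟩ := hp1
    have hminP := pvFindMin C hC _ jst h1
    have hmcle : ∀ i j, j ∈ C → g i j = true → ∃ j', pvMinCol g C i = some j' ∧ j' ≤ j := by
      intro i j hj hgij
      have hsome : (C.find? (g i)).isSome := List.find?_isSome.mpr ⟨j, hj, hgij⟩
      obtain ⟨j', hj'⟩ := Option.isSome_iff_exists.mp hsome
      refine ⟨j', by simpa [pvMinCol] using hj', ?_⟩
      by_contra hgt
      exact absurd hgij (by simp [pvFindMin C hC (g i) j' hj' j hj (by omega)])
    have hfind2 : C.find? (fun j => (pvColHit res n j).isSome) = some jst := by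
      apply pvFindSome C hC _ jst hjstC
      · rw [hisSome]
        obtain ⟨i, hiP, hbeq⟩ := List.any_eq_true.mp hanyM
        have : pvMinCol g C i = some jst := by simpa using hbeq
        exact List.any_eq_true.mpr ⟨i, hiP, List.find?_some this⟩
      · intro j hj hlt
        rw [hisSome]
        by_contra hany
        simp only [Bool.not_eq_false] at hany
        obtain ⟨i, hiP, hgij⟩ := List.any_eq_true.mp hany
        obtain ⟨j', hj'mc, hj'le⟩ := hmcle i j hj hgij
        have hj'C : j' ∈ C := List.mem_of_find?_eq_some (by simpa [pvMinCol] using hj'mc)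
        have := hminP j' hj'C (by omega)
        simp only [Bool.and_eq_false_iff, decide_eq_false_iff_not] at this
        rcases this with h | h
        · exact h (hUB j' hj'C)
        · exact absurd (by simp [hj'mc] : (pvMinCol g C i == some j') = true)
            (by simpa using List.any_eq_false.mp h i hiP)
    rw [hfind2]
    have hmin2 := pvFindMin C hC _ jst hfind2
    show pvLastM g C jst P (n - 1) = (pvColHit res n jst).getD (n - 1)
    have : (pvColHit res n jst).getD (n - 1)
        = P.foldl (fun a i => if g i jst then i else a) (n - 1) := by
      simpa using pvFoldOptGetD (fun i => g i jst) P none (n - 1)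
    rw [this]
    unfold pvLastM
    apply PySem.List.foldl_congr_mem
    intro a i hiP
    have hpt : (pvMinCol g C i == some jst) = g i jst := by
      cases hmc : pvMinCol g C i with
      | none =>
        cases hgi : g i jst with
        | false => simp
        | true =>
          obtain ⟨j', hj', _⟩ := hmcle i jst hjstC hgi
          rw [hmc] at hj'
          exact absurd hj' (by simp)
      | some j' =>
        have hgij' : g i j' = true := List.find?_some (show C.find? (g i) = some j' from hmc)
        by_cases hjj : j' = jst
        · subst hjj
          simp [hgij']
        · have hj'C : j' ∈ C := List.mem_of_find?_eq_some (show C.find? (g i) = some j' from hmc)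
          cases hgi : g i jst with
          | false => simp [hjj]
          | true =>
            obtain ⟨j'', hj''mc, hle''⟩ := hmcle i jst hjstC hgi
            rw [hmc] at hj''mc
            injection hj''mc with hj''mc
            subst hj''mc
            have hlt : j' < jst := lt_of_le_of_ne hle'' hjj
            have hfalse := hmin2 j' hj'C hlt
            rw [hisSome] at hfalse
            exact absurd hgij' (by simpa using List.any_eq_false.mp hfalse i hiP)
    rw [hpt]

-- A's nested scan and B's column scan pick the same pair index
theorem pvKey (res : List String) (n m : Int) :
    ((PySem.List.pyRange 0 n 2).foldl (fun (st : Int × Int) i =>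
        (PySem.List.pyRange 0 m 1).foldl (fun (st : Int × Int) j =>
          if pvDash res i j || pvDash res (i + 1) j then
            (if j ≤ st.2 then (i, j) else st)
          else st) st)
      (n - 1, m - 1)).1 = pvGoCols res n (PySem.List.pyRange 0 m 1) := by
  have hC : (PySem.List.pyRange 0 m 1).Pairwise (· < ·) := PySem.List.pairwise_lt_pyRange_one 0 m
  have hinner : (fun (st : Int × Int) i =>
      (PySem.List.pyRange 0 m 1).foldl (fun (st : Int × Int) j =>
        if pvDash res i j || pvDash res (i + 1) j then
          (if j ≤ st.2 then (i, j) else st)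
        else st) st)
    = (fun (st : Int × Int) i =>
        match pvMinCol (fun i j => pvDash res i j || pvDash res (i + 1) j) (PySem.List.pyRange 0 m 1) i with
        | none => st
        | some j => if j ≤ st.2 then (i, j) else st) := by
    funext st i
    exact pvInner (fun j => pvDash res i j || pvDash res (i + 1) j) i _ hC st
  rw [hinner,
    pvOuter (fun i j => pvDash res i j || pvDash res (i + 1) j) _ hC (PySem.List.pyRange 0 n 2) (n - 1) (m - 1)]
  exact pvBridge res n m

theorem pvPorts_eq (res : List String) : get_gapped res = get_gapped_alt res :=
  congrArg (pvRemovePair res)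
    (pvKey res res.length (PySem.Str.len ((PySem.List.pyGet? res 0).getD "")))

-- ===== VERDICT (by name: the statement is the Claim_ definition above) =====
theorem get_gapped_spec : Claim_equal_get_gapped := by
  intro res _ _
  exact pvPorts_eq res
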